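-- pv_equiv track=rewrite | github.com/soil-physics-okstate/soil-physics-theory | content/online_code_site/PSP_triangulation_NEW/PSP_utility.py | isAdjacentIndex
-- ===== SOURCE A (Python) =====
-- def isAdjacentIndex(t1, t2):
--     shareVertices = 0
--     for i in range(3):
--         for j in range(3):
--             if (t1[i] == t2[j]):
--                 shareVertices += 1
--                 if shareVertices == 2:
--                     return True
--     return False
-- ===== SOURCE B (Python) =====
-- def isAdjacentIndex(t1, t2):
--     freq = {}
--     for v in t1[:3]:
--         freq[v] = freq.get(v, 0) + 1
--     total = 0
--     for v in t2[:3]: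
--         total += freq.get(v, 0)
--     return total >= 2
-- ===== Notes on version B (the rewrite author's own statement) =====
-- stated objective: idiomatic
-- what changed: Replaces the nested 3x3 scan with early return by building a frequency table of t1's three vertices once and summing the looked-up counts over t2's three vertices in a single pass, returning whether the pair count reaches 2.
-- outside the precondition, e.g. on isAdjacentIndex([5], [5, 5]): A returns True, B returns True; on isAdjacentIndex([5, 5], [5]): A raises IndexError, B returns True
import Mathlib
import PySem

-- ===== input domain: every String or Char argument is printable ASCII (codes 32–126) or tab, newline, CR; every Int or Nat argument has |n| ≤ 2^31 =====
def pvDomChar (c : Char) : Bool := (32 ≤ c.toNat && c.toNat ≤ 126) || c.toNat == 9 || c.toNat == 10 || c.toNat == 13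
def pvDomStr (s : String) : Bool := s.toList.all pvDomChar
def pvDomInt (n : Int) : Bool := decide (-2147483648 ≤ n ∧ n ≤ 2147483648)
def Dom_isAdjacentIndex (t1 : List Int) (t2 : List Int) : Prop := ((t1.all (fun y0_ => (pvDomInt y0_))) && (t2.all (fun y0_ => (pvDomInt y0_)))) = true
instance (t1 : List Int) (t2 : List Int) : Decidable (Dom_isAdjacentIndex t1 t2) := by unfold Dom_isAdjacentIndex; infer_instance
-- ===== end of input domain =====

-- B builds a frequency table of t1's three vertices once and sums the looked-up counts over
-- t2's three vertices in one pass (idiomatic table-then-scan, replacing A's nested 3x3 loop).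

-- ===== PORT A =====
-- the nested 'for i in range(3): for j in range(3):' loop with its early return, as a
-- recursion over the flattened list of index pairs carrying the shareVertices counter
def pvAGo (t1 : List Int) (t2 : List Int) : List (Int × Int) → Int → Bool
  | [], _ => false
  | (i, j) :: rest, s =>
    if PySem.List.pyGetD t1 i 0 == PySem.List.pyGetD t2 j 0 then
      if s + 1 == 2 then true else pvAGo t1 t2 rest (s + 1)
    else pvAGo t1 t2 rest s

def isAdjacentIndex (t1 : List Int) (t2 : List Int) : Bool :=
  pvAGo t1 t2
    ((PySem.List.pyRange 0 3 1).flatMap (fun i => (PySem.List.pyRange 0 3 1).map (fun j => (i, j))))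
    0

-- ===== PORT B =====
def isAdjacentIndex_alt (t1 : List Int) (t2 : List Int) : Bool :=
  let freq := (PySem.List.slice t1 (some 0) (some 3)).foldl
      (fun d v => d.insert v (d.getD v 0 + 1)) PySem.Dict.empty
  let total := (PySem.List.slice t2 (some 0) (some 3)).foldl
      (fun acc v => acc + freq.getD v 0) (0 : Int)
  decide (2 ≤ total)

-- ===== PRECONDITION & SPEC =====
-- Pre_ excludes non-triangle inputs (fewer than 3 vertices), which are outside the task's
-- domain: there A's indexing raises IndexError unless an early return fires first.
def Pre_isAdjacentIndex (t1 : List Int) (t2 : List Int) : Prop := 3 ≤ t1.length ∧ 3 ≤ t2.length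
instance (t1 : List Int) (t2 : List Int) : Decidable (Pre_isAdjacentIndex t1 t2) := by unfold Pre_isAdjacentIndex; infer_instance
def pvWitness_isAdjacentIndex : List Int × List Int := ([1, 2, 3], [2, 3, 4])

def Spec_isAdjacentIndex (t1 : List Int) (t2 : List Int) (out : Bool) : Prop := out = isAdjacentIndex_alt t1 t2
instance (t1 : List Int) (t2 : List Int) (out : Bool) : Decidable (Spec_isAdjacentIndex t1 t2 out) := by unfold Spec_isAdjacentIndex; infer_instance

-- ===== CLAIM (what is proved, stated in full; the proofs are below) =====
def Claim_equal_isAdjacentIndex : Prop := ∀ (t1 : List Int) (t2 : List Int), Dom_isAdjacentIndex t1 t2 → Pre_isAdjacentIndex t1 t2 → Spec_isAdjacentIndex t1 t2 (isAdjacentIndex t1 t2)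

-- ===== LEMMAS AND PROOFS =====

theorem pvGet0 (u v w : Int) (t : List Int) : PySem.List.pyGet? (u::v::w::t) (0:Int) = some u := by
  simp [PySem.List.pyGet?, PySem.List.pyIdx?]
  rw [if_pos (by omega)]
  simp

theorem pvGet1 (u v w : Int) (t : List Int) : PySem.List.pyGet? (u::v::w::t) (1:Int) = some v := by
  simp [PySem.List.pyGet?, PySem.List.pyIdx?]
  rw [if_pos (by omega)]
  simp

theorem pvGet2 (u v w : Int) (t : List Int) : PySem.List.pyGet? (u::v::w::t) (2:Int) = some w := by
  simp [PySem.List.pyGet?, PySem.List.pyIdx?]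
  rw [if_pos (by omega)]
  simp

theorem pv_main (a b c x y z : Int) (r s : List Int) :
    isAdjacentIndex (a :: b :: c :: r) (x :: y :: z :: s)
      = isAdjacentIndex_alt (a :: b :: c :: r) (x :: y :: z :: s) := by
  have hsl1 : PySem.List.slice (a :: b :: c :: r) (some 0) (some 3) = [a, b, c] := by
    simpa using PySem.List.slice_natCast (a :: b :: c :: r) 0 3
  have hsl2 : PySem.List.slice (x :: y :: z :: s) (some 0) (some 3) = [x, y, z] := by
    simpa using PySem.List.slice_natCast (x :: y :: z :: s) 0 3
  have hpr : PySem.List.pyRange 0 3 1 = [0, 1, 2] := by decide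
  simp only [isAdjacentIndex, isAdjacentIndex_alt, hsl1, hsl2, hpr,
    PySem.Dict.foldl_insert_getD_add_one_eq_counter]
  simp only [List.flatMap, List.map, List.flatten, List.append, List.foldl, pvAGo,
    PySem.Dict.getD_counter, List.count_cons, List.count_nil]
  simp only [PySem.List.pyGetD, pvGet0, pvGet1, pvGet2, Option.getD_some,
    show ((0+1:Int) == 2) = false by decide,
    show ((0+1+1:Int) == 2) = true by decide,
    show ((0+1+1+1:Int) == 2) = false by decide,
    show ((0+1+1+1+1:Int) == 2) = false by decide,
    show ((0+1+1+1+1+1:Int) == 2) = false by decide,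
    show ((0+1+1+1+1+1+1:Int) == 2) = false by decide,
    show ((0+1+1+1+1+1+1+1:Int) == 2) = false by decide,
    show ((0+1+1+1+1+1+1+1+1:Int) == 2) = false by decide,
    show ((0+1+1+1+1+1+1+1+1+1:Int) == 2) = false by decide]
  generalize (a == x) = e1
  generalize (a == y) = e2
  generalize (a == z) = e3
  generalize (b == x) = e4
  generalize (b == y) = e5
  generalize (b == z) = e6
  generalize (c == x) = e7
  generalize (c == y) = e8
  generalize (c == z) = e9
  revert e1 e2 e3 e4 e5 e6 e7 e8 e9
  decide

-- ===== VERDICT (by name: the statement is the Claim_ definition above) =====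
theorem isAdjacentIndex_spec : Claim_equal_isAdjacentIndex := by
  intro t1 t2 _ hpre
  unfold Spec_isAdjacentIndex
  match t1, t2, hpre with
  | a :: b :: c :: r, x :: y :: z :: s, _ => exact pv_main a b c x y z r s
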